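-- pv_equiv track=rewrite | github.com/cdlewis/snowboardkids2-decomp | tools/decode_buttons.py | decode_buttons
-- ===== SOURCE A (Python) =====
-- BUTTONS = {
--     0x80000: "STICK_LEFT",
--     0x40000: "STICK_RIGHT",
--     0x20000: "STICK_DOWN",
--     0x10000: "STICK_UP",
--     0x8000: "A_BUTTON (CONT_A)",
--     0x4000: "B_BUTTON (CONT_B)",
--     0x2000: "Z_TRIG (CONT_G)",
--     0x1000: "START_BUTTON (CONT_START)",
--     0x0800: "U_JPAD (CONT_UP)",
--     0x0400: "D_JPAD (CONT_DOWN)",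
--     0x0200: "L_JPAD (CONT_LEFT)",
--     0x0100: "R_JPAD (CONT_RIGHT)",
--     0x0020: "L_TRIG (CONT_L)",
--     0x0010: "R_TRIG (CONT_R)",
--     0x0008: "U_CBUTTONS (CONT_E)",
--     0x0004: "D_CBUTTONS (CONT_D)",
--     0x0002: "L_CBUTTONS (CONT_C)",
--     0x0001: "R_CBUTTONS (CONT_F)",
-- }
--
-- def decode_buttons(value):
--     """Decode a button bitmask and return list of pressed buttons."""
--     if isinstance(value, str):
--         # Parse hex string (with or without 0x prefix)
--         value = int(value, 16) if not value.startswith('0x') else int(value, 0)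
--
--     pressed = []
--     remaining = value
--
--     # Check each button mask
--     for mask, name in sorted(BUTTONS.items(), reverse=True):
--         if value & mask:
--             pressed.append((mask, name))
--             remaining &= ~mask
--
--     return pressed, remaining
-- ===== SOURCE B (Python) =====
-- BUTTONS = {
--     0x80000: "STICK_LEFT",
--     0x40000: "STICK_RIGHT",
--     0x20000: "STICK_DOWN",
--     0x10000: "STICK_UP",
--     0x8000: "A_BUTTON (CONT_A)",
--     0x4000: "B_BUTTON (CONT_B)",
--     0x2000: "Z_TRIG (CONT_G)",
--     0x1000: "START_BUTTON (CONT_START)",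
--     0x0800: "U_JPAD (CONT_UP)",
--     0x0400: "D_JPAD (CONT_DOWN)",
--     0x0200: "L_JPAD (CONT_LEFT)",
--     0x0100: "R_JPAD (CONT_RIGHT)",
--     0x0020: "L_TRIG (CONT_L)",
--     0x0010: "R_TRIG (CONT_R)",
--     0x0008: "U_CBUTTONS (CONT_E)",
--     0x0004: "D_CBUTTONS (CONT_D)",
--     0x0002: "L_CBUTTONS (CONT_C)",
--     0x0001: "R_CBUTTONS (CONT_F)",
-- }
--
-- ALL_MASK = 0
-- for _m in BUTTONS:
--     ALL_MASK |= _m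
--
--
-- def decode_buttons(value):
--     """Decode a button bitmask and return list of pressed buttons."""
--     if isinstance(value, str):
--         # Parse hex string (with or without 0x prefix)
--         value = int(value, 16) if not value.startswith('0x') else int(value, 0)
--
--     pressed = []
--     known = value & ALL_MASK          # only the recognised bits, always >= 0
--
--     # Walk the set bits of `known` from the highest down, instead of
--     # scanning the whole button table.
--     while known:
--         pos = known.bit_length() - 1
--         mask = 1 << pos
--         pressed.append((mask, BUTTONS[mask]))
--         known -= mask
--
--     return pressed, value & ~ALL_MASK
-- ===== Notes on version B (the rewrite author's own statement) =====
-- stated objective: alternative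
-- what changed: Instead of scanning the fixed button table and testing each mask against the value, B masks the value down to the known bits once (value & ALL_MASK) and walks only the set bits of that number from the highest down via bit_length, looking each single-bit mask up in BUTTONS; the unknown remainder is computed in one step as value & ~ALL_MASK instead of by clearing bits one at a time.
import Mathlib
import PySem

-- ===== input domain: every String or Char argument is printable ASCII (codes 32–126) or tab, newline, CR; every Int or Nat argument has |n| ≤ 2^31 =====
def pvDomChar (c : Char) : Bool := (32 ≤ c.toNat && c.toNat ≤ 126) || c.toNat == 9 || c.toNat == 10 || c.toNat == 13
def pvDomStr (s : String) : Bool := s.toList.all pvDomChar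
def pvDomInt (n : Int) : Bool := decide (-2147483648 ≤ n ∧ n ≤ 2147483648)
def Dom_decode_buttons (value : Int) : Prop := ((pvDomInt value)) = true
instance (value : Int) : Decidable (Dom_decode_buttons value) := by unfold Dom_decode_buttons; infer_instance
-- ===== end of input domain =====

-- B walks only the set bits of value & ALL_MASK from the highest down (via bit_length) instead of
-- scanning the whole 18-entry button table, and computes the remainder in one step as value & ~ALL_MASK.

-- ===== PORT A =====
-- the module-level BUTTONS dict (shared context of both implementations)
def pvButtons : PySem.Dict Int String := PySem.Dict.ofList
  [(0x80000, "STICK_LEFT"), (0x40000, "STICK_RIGHT"), (0x20000, "STICK_DOWN"), (0x10000, "STICK_UP"),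
   (0x8000, "A_BUTTON (CONT_A)"), (0x4000, "B_BUTTON (CONT_B)"), (0x2000, "Z_TRIG (CONT_G)"),
   (0x1000, "START_BUTTON (CONT_START)"), (0x0800, "U_JPAD (CONT_UP)"), (0x0400, "D_JPAD (CONT_DOWN)"),
   (0x0200, "L_JPAD (CONT_LEFT)"), (0x0100, "R_JPAD (CONT_RIGHT)"), (0x0020, "L_TRIG (CONT_L)"),
   (0x0010, "R_TRIG (CONT_R)"), (0x0008, "U_CBUTTONS (CONT_E)"), (0x0004, "D_CBUTTONS (CONT_D)"),
   (0x0002, "L_CBUTTONS (CONT_C)"), (0x0001, "R_CBUTTONS (CONT_F)")]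

-- the isinstance(value, str) branch does not apply here: this port's argument is an int
def decode_buttons (value : Int) : (List (Int × String)) × Int :=
  -- sorted(BUTTONS.items(), reverse=True): tuple sort = lexicographic on (fst, snd)
  let items := PySem.List.sorted2 (PySem.Dict.items pvButtons) Prod.fst Prod.snd true
  items.foldl
    (fun st mn =>
      if PySem.Int.band value mn.1 ≠ 0 then
        (st.1 ++ [mn], PySem.Int.band st.2 (Int.not mn.1))
      else st)
    ([], value)

-- ===== PORT B =====
-- module-level ALL_MASK = OR of all BUTTONS keys
def pvAllMask : Int := (PySem.Dict.keys pvButtons).foldl (fun a m => PySem.Int.bor a m) 0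

-- the while-loop of B: `known` is value & ALL_MASK, always ≥ 0, carried as a Nat;
-- BUTTONS[mask] is ported as get? ... |>.getD "" (the key is always present, so KeyError cannot occur)
def pvLoop (known : Nat) : List (Int × String) :=
  if h : known = 0 then []
  else
    let pos := PySem.Int.bitLength (known : Int) - 1
    let mask : Nat := 1 <<< pos
    (((mask : Nat) : Int), (PySem.Dict.get? pvButtons ((mask : Nat) : Int)).getD "") :: pvLoop (known - mask)
termination_by known
decreasing_by
  exact Nat.sub_lt (Nat.pos_of_ne_zero h) (by rw [Nat.one_shiftLeft]; exact Nat.two_pow_pos _)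

-- the isinstance(value, str) branch does not apply here: this port's argument is an int
def decode_buttons_alt (value : Int) : (List (Int × String)) × Int :=
  let known := PySem.Int.band value pvAllMask
  (pvLoop known.toNat, PySem.Int.band value (Int.not pvAllMask))

-- ===== PRECONDITION & SPEC =====
def Spec_decode_buttons (value : Int) (out : (List (Int × String)) × Int) : Prop := out = decode_buttons_alt value
instance (value : Int) (out : (List (Int × String)) × Int) : Decidable (Spec_decode_buttons value out) := by unfold Spec_decode_buttons; infer_instance

-- ===== CLAIM (what is proved, stated in full; the proofs are below) =====
def Claim_equal_decode_buttons : Prop := ∀ (value : Int), Dom_decode_buttons value → Spec_decode_buttons value (decode_buttons value)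

-- ===== LEMMAS AND PROOFS =====

-- the button table as (bit position, name) pairs, in A's (descending) scan order
def pvPS : List (Nat × String) :=
  [(19, "STICK_LEFT"), (18, "STICK_RIGHT"), (17, "STICK_DOWN"), (16, "STICK_UP"),
   (15, "A_BUTTON (CONT_A)"), (14, "B_BUTTON (CONT_B)"), (13, "Z_TRIG (CONT_G)"),
   (12, "START_BUTTON (CONT_START)"), (11, "U_JPAD (CONT_UP)"), (10, "D_JPAD (CONT_DOWN)"),
   (9, "L_JPAD (CONT_LEFT)"), (8, "R_JPAD (CONT_RIGHT)"), (5, "L_TRIG (CONT_L)"),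
   (4, "R_TRIG (CONT_R)"), (3, "U_CBUTTONS (CONT_E)"), (2, "D_CBUTTONS (CONT_D)"),
   (1, "L_CBUTTONS (CONT_C)"), (0, "R_CBUTTONS (CONT_F)")]

def pvLIT : List (Int × String) := pvPS.map (fun pn => (((2 : Int) ^ pn.1), pn.2))

theorem pv_sorted_eq :
    PySem.List.sorted2 (PySem.Dict.items pvButtons) Prod.fst Prod.snd true = pvLIT := by decide

theorem pv_allMask_eq : pvAllMask = (1048383 : Int) := by decide

-- x + y = x ^^^ y when x and y share no bits
theorem pv_add_disj (x : Nat) : ∀ y : Nat, x &&& y = 0 → x + y = x ^^^ y := by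
  induction x using Nat.strong_induction_on with
  | _ x ih =>
    intro y h
    rcases Nat.eq_zero_or_pos x with hx | hx
    · subst hx; simp
    · have h2 : x / 2 &&& y / 2 = 0 := by
        apply Nat.zero_of_testBit_eq_false
        intro i
        have h' := congrArg (fun t => Nat.testBit t (i + 1)) h
        simp only [Nat.testBit_and, Nat.zero_testBit] at h'
        rw [Nat.testBit_and, Nat.testBit_div_two, Nat.testBit_div_two]
        exact h'
      have ih2 := ih (x / 2) (Nat.div_lt_self hx (by omega)) (y / 2) h2
      have hb0 : ¬(x % 2 = 1 ∧ y % 2 = 1) := by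
        rintro ⟨hx1, hy1⟩
        have h0 := congrArg (fun t => Nat.testBit t 0) h
        simp only [Nat.testBit_and, Nat.zero_testBit] at h0
        rw [Nat.mod_two_eq_one_iff_testBit_zero] at hx1 hy1
        simp [hx1, hy1] at h0
      have hxor2 : (x ^^^ y) / 2 = x / 2 ^^^ y / 2 := Nat.xor_div_two
      have hxorm : (x ^^^ y) % 2 = (x + y) % 2 := Nat.xor_mod_two_eq
      omega

-- a - (a &&& b) = a ^^^ (a &&& b)  (clearing a's bits that also occur in b)
theorem pv_sub_and (a b : Nat) : a - (a &&& b) = a ^^^ (a &&& b) := by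
  have hd : (a ^^^ (a &&& b)) &&& (a &&& b) = 0 := by
    apply Nat.zero_of_testBit_eq_false
    intro i
    simp only [Nat.testBit_and, Nat.testBit_xor]
    cases a.testBit i <;> cases b.testBit i <;> rfl
  have hs := pv_add_disj _ _ hd
  have : (a ^^^ (a &&& b)) + (a &&& b) = a := by
    rw [hs, Nat.xor_assoc, Nat.xor_self, Nat.xor_zero]
  omega

-- Python &-semantics by constructor shapes
theorem pv_band_cc (a b : Nat) : PySem.Int.band (a : Int) (b : Int) = ((a &&& b : Nat) : Int) :=
  PySem.Int.band_natCast a b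

theorem pv_band_cn (a b : Nat) : PySem.Int.band (a : Int) (Int.negSucc b) = ((a - (a &&& b) : Nat) : Int) := by
  simp only [PySem.Int.band]
  rw [if_pos (Int.natCast_nonneg a), if_neg (by exact Int.not_le.mpr (Int.negSucc_lt_zero b))]
  simp [Int.negSucc_eq]

theorem pv_band_nc (a b : Nat) : PySem.Int.band (Int.negSucc a) (b : Int) = ((b - (b &&& a) : Nat) : Int) := by
  simp only [PySem.Int.band]
  rw [if_neg (by exact Int.not_le.mpr (Int.negSucc_lt_zero a)), if_pos (Int.natCast_nonneg b)]
  simp [Int.negSucc_eq]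

theorem pv_band_nn (a b : Nat) :
    PySem.Int.band (Int.negSucc a) (Int.negSucc b) = Int.negSucc (a ||| b) := by
  simp only [PySem.Int.band]
  rw [if_neg (by exact Int.not_le.mpr (Int.negSucc_lt_zero a)),
      if_neg (by exact Int.not_le.mpr (Int.negSucc_lt_zero b))]
  simp [Int.negSucc_eq]
  ring

theorem pv_not_cast (a : Nat) : Int.not (a : Int) = Int.negSucc a := rfl

-- clearing one more mask commutes with folding it into the accumulated OR
theorem pvL1 (v : Int) (a m : Nat) :
    PySem.Int.band (PySem.Int.band v (Int.not (a : Int))) (Int.not (m : Int)) =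
      PySem.Int.band v (Int.not ((a ||| m : Nat) : Int)) := by
  rw [pv_not_cast, pv_not_cast, pv_not_cast]
  cases v with
  | ofNat n =>
    show PySem.Int.band (PySem.Int.band (n : Int) (Int.negSucc a)) (Int.negSucc m) =
      PySem.Int.band (n : Int) (Int.negSucc (a ||| m))
    rw [pv_band_cn, pv_band_cn, pv_band_cn, pv_sub_and, pv_sub_and, pv_sub_and]
    congr 1
    apply Nat.eq_of_testBit_eq
    intro i
    simp only [Nat.testBit_xor, Nat.testBit_and, Nat.testBit_or]
    cases n.testBit i <;> cases a.testBit i <;> cases m.testBit i <;> rfl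
  | negSucc k =>
    rw [pv_band_nn, pv_band_nn, pv_band_nn, Nat.or_assoc]

-- an unset mask adds nothing to the cleared value
theorem pvL2 (v : Int) (a m : Nat) (h : PySem.Int.band v (m : Int) = 0) :
    PySem.Int.band v (Int.not (a : Int)) = PySem.Int.band v (Int.not ((a ||| m : Nat) : Int)) := by
  rw [pv_not_cast, pv_not_cast]
  cases v with
  | ofNat n =>
    show PySem.Int.band (n : Int) (Int.negSucc a) = PySem.Int.band (n : Int) (Int.negSucc (a ||| m))
    have hnm : n &&& m = 0 := by
      have := h
      rw [show ((Int.ofNat n) : Int) = ((n : Nat) : Int) from rfl] at this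
      rw [pv_band_cc] at this
      exact_mod_cast this
    rw [pv_band_cn, pv_band_cn]
    have : n &&& (a ||| m) = n &&& a := by
      apply Nat.eq_of_testBit_eq
      intro i
      have h' := congrArg (fun t => Nat.testBit t i) hnm
      simp only [Nat.testBit_and, Nat.zero_testBit] at h'
      simp only [Nat.testBit_and, Nat.testBit_or]
      cases hn : n.testBit i <;> cases hm : m.testBit i <;> simp_all
    rw [this]
  | negSucc k =>
    rw [pv_band_nc] at h
    have hmk : m &&& k = m := by
      have hle : m &&& k ≤ m := Nat.and_le_left
      have : m - (m &&& k) = 0 := by exact_mod_cast h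
      omega
    rw [pv_band_nn, pv_band_nn]
    congr 1
    apply Nat.eq_of_testBit_eq
    intro i
    have h' := congrArg (fun t => Nat.testBit t i) hmk
    simp only [Nat.testBit_and] at h'
    simp only [Nat.testBit_or]
    cases hm : m.testBit i <;> cases hk : k.testBit i <;> simp_all

-- A's fold, split into its two components
theorem pv_foldA (v : Int) (L : List (Int × String)) : ∀ (acc : List (Int × String)) (r : Int),
    L.foldl
      (fun st mn =>
        if PySem.Int.band v mn.1 ≠ 0 then (st.1 ++ [mn], PySem.Int.band st.2 (Int.not mn.1)) else st)
      (acc, r)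
    = (acc ++ L.filter (fun mn => decide (PySem.Int.band v mn.1 ≠ 0)),
       L.foldl (fun r mn => if PySem.Int.band v mn.1 ≠ 0 then PySem.Int.band r (Int.not mn.1) else r) r) := by
  induction L with
  | nil => intro acc r; simp
  | cons mn tl ih =>
    intro acc r
    by_cases hc : PySem.Int.band v mn.1 ≠ 0
    · simp only [List.foldl_cons, if_pos hc, List.filter_cons, decide_eq_true hc]
      rw [ih]
      simp
    · simp only [List.foldl_cons, if_neg hc, List.filter_cons]
      rw [ih]
      simp [hc]

-- the conditional clearing loop is one big AND-NOT
theorem pv_foldClear (v : Int) (L : List (Int × String)) :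
    ∀ a : Nat, (∀ mn ∈ L, ∃ m : Nat, mn.1 = (m : Int)) →
    L.foldl (fun r mn => if PySem.Int.band v mn.1 ≠ 0 then PySem.Int.band r (Int.not mn.1) else r)
        (PySem.Int.band v (Int.not (a : Int)))
      = PySem.Int.band v (Int.not (L.foldl (fun s mn => PySem.Int.bor s mn.1) ((a : Nat) : Int))) := by
  induction L with
  | nil => intro a _; rfl
  | cons mn tl ih =>
    intro a hL
    obtain ⟨m, hm⟩ := hL mn (List.mem_cons_self ..)
    have hrest : ∀ x ∈ tl, ∃ mm : Nat, x.1 = (mm : Int) := fun x hx => hL x (List.mem_cons_of_mem _ hx)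
    simp only [List.foldl_cons, hm, PySem.Int.bor_natCast]
    by_cases hc : PySem.Int.band v (m : Int) ≠ 0
    · rw [if_pos hc, pvL1, ih (a ||| m) hrest]
    · rw [if_neg hc, pvL2 v a m (by simpa using hc), ih (a ||| m) hrest]

-- bits of value & ALL_MASK lie inside ALL_MASK
theorem pv_bits_subset (v : Int) (i : Nat)
    (h : (PySem.Int.band v (1048383 : Int)).toNat.testBit i = true) :
    Nat.testBit 1048383 i = true := by
  have hAM : (1048383 : Int) = ((1048383 : Nat) : Int) := by norm_num
  cases v with
  | ofNat n =>
    rw [show ((Int.ofNat n) : Int) = ((n : Nat) : Int) from rfl, hAM, pv_band_cc,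
        Int.toNat_natCast, Nat.testBit_and] at h
    exact ((Bool.and_eq_true _ _).mp h).2
  | negSucc k =>
    rw [hAM, pv_band_nc, Int.toNat_natCast, pv_sub_and] at h
    by_contra hcon
    have hfalse : Nat.testBit 1048383 i = false := by
      cases hx : Nat.testBit 1048383 i
      · rfl
      · exact absurd hx hcon
    rw [Nat.testBit_xor, Nat.testBit_and, hfalse] at h
    simp at h

-- value presses a button iff the corresponding bit of value & ALL_MASK is set
theorem pv_bridge (v : Int) (p : Nat) (hp : Nat.testBit 1048383 p = true) :
    (PySem.Int.band v (1048383 : Int)).toNat.testBit p =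
      decide (PySem.Int.band v ((2 : Int) ^ p) ≠ 0) := by
  have h2 : ((2 : Int) ^ p) = ((2 ^ p : Nat) : Int) := by push_cast; ring
  have hAM : (1048383 : Int) = ((1048383 : Nat) : Int) := by norm_num
  cases v with
  | ofNat n =>
    rw [show ((Int.ofNat n) : Int) = ((n : Nat) : Int) from rfl, hAM, h2, pv_band_cc, pv_band_cc,
        Int.toNat_natCast, Nat.testBit_and, Nat.and_two_pow]
    cases hn : n.testBit p
    · simp [hp]
    · simp [hp]
  | negSucc k =>
    rw [hAM, h2, pv_band_nc, pv_band_nc, Int.toNat_natCast, pv_sub_and,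
        Nat.testBit_xor, Nat.testBit_and, hp]
    have hkp : 2 ^ p &&& k = 2 ^ p * (k.testBit p).toNat := by
      rw [Nat.and_comm, Nat.and_two_pow]; ring
    rw [hkp]
    cases hk : k.testBit p
    · simp
    · simp

-- B's bit-walking loop, characterised as a filter over the (descending) position table
theorem pv_loop_filter : ∀ (PS : List (Nat × String)) (n : Nat),
    List.Pairwise (fun x y => y.1 < x.1) PS →
    (∀ i, n.testBit i = true → i ∈ PS.map Prod.fst) →
    (∀ pn ∈ PS, ((PySem.Dict.get? pvButtons ((2 : Int) ^ pn.1)).getD "") = pn.2) →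
    pvLoop n = (PS.filter (fun pn => n.testBit pn.1)).map (fun pn => (((2 : Int) ^ pn.1), pn.2)) := by
  intro PS
  induction PS with
  | nil =>
    intro n _ hbits _
    have hn : n = 0 := by
      apply Nat.zero_of_testBit_eq_false
      intro i
      cases h : n.testBit i
      · rfl
      · exact absurd (hbits i h) (by simp)
    subst hn
    simp [pvLoop]
  | cons pn tl ih =>
    intro n hpair hbits hname
    obtain ⟨h1, h2⟩ := List.pairwise_cons.mp hpair
    by_cases hb : n.testBit pn.1 = true
    · -- the highest remaining position is set: the loop peels exactly it
      have hn0 : n ≠ 0 := by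
        intro h0
        rw [h0, Nat.zero_testBit] at hb
        exact Bool.false_ne_true hb
      have hub : n < 2 ^ (pn.1 + 1) := by
        apply Nat.lt_pow_two_of_testBit
        intro i hi
        cases hti : n.testBit i
        · rfl
        · exfalso
          have hmem := hbits i hti
          simp only [List.map_cons, List.mem_cons, List.mem_map] at hmem
          rcases hmem with h | ⟨x, hx, hxi⟩
          · omega
          · have := h1 x hx; omega
      have hlb : 2 ^ pn.1 ≤ n := Nat.ge_two_pow_of_testBit hb
      have hbl : PySem.Int.bitLength (n : Int) = pn.1 + 1 := by
        have ha := PySem.Int.lt_two_pow_bitLength (n : Int)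
        have hc := PySem.Int.two_pow_bitLength_le (n : Int) (by exact_mod_cast hn0)
        rw [Int.natAbs_natCast] at ha hc
        have hgt : pn.1 < PySem.Int.bitLength (n : Int) :=
          (Nat.pow_lt_pow_iff_right (by omega)).mp (Nat.lt_of_le_of_lt hlb ha)
        have hlt : PySem.Int.bitLength (n : Int) - 1 < pn.1 + 1 :=
          (Nat.pow_lt_pow_iff_right (by omega)).mp (Nat.lt_of_le_of_lt hc hub)
        omega
      rw [pvLoop, dif_neg hn0]
      simp only [hbl, Nat.add_sub_cancel, Nat.one_shiftLeft]
      set r := n - 2 ^ pn.1 with hrdef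
      have hrlt : r < 2 ^ pn.1 := by
        have := hub
        rw [pow_succ] at this
        omega
      have hor : n = 2 ^ pn.1 ||| r := by
        have hsum : n = 2 ^ pn.1 + r := by omega
        rw [hsum]
        simpa using Nat.two_pow_add_eq_or_of_lt hrlt 1
      have hrbit : ∀ i, i ≠ pn.1 → r.testBit i = n.testBit i := by
        intro i hip
        conv_rhs => rw [hor]
        rw [Nat.testBit_or, Nat.testBit_two_pow_of_ne (fun he => hip he.symm)]
        simp
      have hrp : r.testBit pn.1 = false := Nat.testBit_lt_two_pow hrlt
      rw [ih r h2 ?_ (fun x hx => hname x (List.mem_cons_of_mem _ hx))]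
      · rw [List.filter_cons]
        simp only [hb, if_pos]
        rw [List.map_cons]
        congr 1
        · have hhd := hname pn (List.mem_cons_self ..)
          rw [← hhd]
          congr 1
        · congr 1
          apply List.filter_congr
          intro x hx
          have := h1 x hx
          rw [hrbit x.1 (by omega)]
      · intro i hi
        have hip : i ≠ pn.1 := by
          intro he
          rw [he, hrp] at hi
          exact Bool.false_ne_true hi
        have hni : n.testBit i = true := by rw [← hrbit i hip]; exact hi
        have hmem := hbits i hni
        simp only [List.map_cons, List.mem_cons] at hmem
        rcases hmem with h | h
        · exact absurd h hip
        · exact h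
    · -- position not set: the loop state is unchanged, the filter skips it
      have hbits' : ∀ i, n.testBit i = true → i ∈ tl.map Prod.fst := by
        intro i hi
        have hmem := hbits i hi
        simp only [List.map_cons, List.mem_cons] at hmem
        rcases hmem with h | h
        · exact absurd (h ▸ hi) hb
        · exact h
      rw [ih n h2 hbits' (fun x hx => hname x (List.mem_cons_of_mem _ hx))]
      rw [List.filter_cons]
      simp [hb]

-- ===== VERDICT (by name: the statement is the Claim_ definition above) =====
theorem decode_buttons_spec : Claim_equal_decode_buttons := by
  intro v _
  unfold Spec_decode_buttons decode_buttons decode_buttons_alt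
  rw [pv_sorted_eq, pv_allMask_eq, pv_foldA]
  simp only [List.nil_append]
  have hstart : PySem.Int.band v (Int.not (((0 : Nat)) : Int)) = v := by
    rw [show (((0 : Nat)) : Int) = 0 by norm_num, show Int.not 0 = (-1 : Int) from rfl]
    exact PySem.Int.band_neg_one v
  apply Prod.ext
  · -- pressed component
    show pvLIT.filter (fun mn => decide (PySem.Int.band v mn.1 ≠ 0))
        = pvLoop (PySem.Int.band v (1048383 : Int)).toNat
    have hPSbit : ∀ pn ∈ pvPS, Nat.testBit 1048383 pn.1 = true := by decide
    have hsub : ∀ i, (PySem.Int.band v (1048383 : Int)).toNat.testBit i = true →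
        i ∈ pvPS.map Prod.fst := by
      intro i hi
      have hAMi := pv_bits_subset v i hi
      have hi20 : i < 20 := by
        by_contra hge
        have hlt : (1048383 : Nat) < 2 ^ i := by
          calc (1048383 : Nat) < 2 ^ 20 := by norm_num
          _ ≤ 2 ^ i := Nat.pow_le_pow_right (by omega) (by omega)
        rw [Nat.testBit_lt_two_pow hlt] at hAMi
        exact Bool.false_ne_true hAMi
      have hall : ∀ j < 20, Nat.testBit 1048383 j = true → j ∈ pvPS.map Prod.fst := by decide
      exact hall i hi20 hAMi
    unfold pvLIT
    rw [List.filter_map,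
        pv_loop_filter pvPS ((PySem.Int.band v (1048383 : Int)).toNat) (by decide) hsub (by decide)]
    congr 1
    apply List.filter_congr
    intro pn hmem
    simp only [Function.comp_apply]
    exact (pv_bridge v pn.1 (hPSbit pn hmem)).symm
  · -- remaining component
    show pvLIT.foldl
          (fun r mn => if PySem.Int.band v mn.1 ≠ 0 then PySem.Int.band r (Int.not mn.1) else r) v
        = PySem.Int.band v (Int.not (1048383 : Int))
    have hFC := pv_foldClear v pvLIT 0 (by
      intro mn hmem
      rw [pvLIT, List.mem_map] at hmem
      obtain ⟨pn, _, rfl⟩ := hmem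
      exact ⟨2 ^ pn.1, by push_cast; ring⟩)
    rw [hstart] at hFC
    rw [hFC]
    congr 2
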